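-- pv_equiv track=rewrite | github.com/bluerand4/news_for_investing | a14_screenshot_tradingview.py | find_repeated_substrings
-- ===== SOURCE A (Python) =====
-- from collections import Counter
--
-- def find_repeated_substrings(word_list, min_length=2, min_repeats=3):
--     substring_counts = Counter()
--
--     # Iterate over each word
--     for word in word_list:
--         length = len(word)
--         # Generate substrings for each word
--         for start in range(length):
--             for end in range(start + min_length, length + 1):
--                 substring = word[start:end]
--                 substring_counts[substring] += 1
--
--     # Filter based on minimum repeats
--     return {sub: count for sub, count in substring_counts.items() if count >= min_repeats}
-- ===== SOURCE B (Python) =====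
-- def find_repeated_substrings(word_list, min_length=2, min_repeats=3):
--     counts = {}
--     for word in word_list:
--         for start in range(len(word)):
--             sub = ""
--             for ch in word[start:]:
--                 sub += ch
--                 if len(sub) >= min_length:
--                     counts[sub] = counts.get(sub, 0) + 1
--     return {s: c for s, c in counts.items() if c >= min_repeats}
-- ===== Notes on version B (the rewrite author's own statement) =====
-- stated objective: alternative
-- what changed: B drops the nested (start,end) slice enumeration and Counter: for each start position it extends one substring a character at a time, counting each extension of length >= min_length in a plain dict built with get, so no slicing and no end-index loop.
-- outside the precondition, e.g. on find_repeated_substrings(['ab'], 0, 1): A returns {'': 2, 'a': 1, 'ab': 1, 'b': 1}, B returns {'a': 1, 'ab': 1, 'b': 1}; on find_repeated_substrings(['ab'], -2, 1): A returns {'': 5, 'a': 2, 'ab': 1, 'b': 1}, B returns {'a': 1, 'ab': 1, 'b': 1}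
import Mathlib
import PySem

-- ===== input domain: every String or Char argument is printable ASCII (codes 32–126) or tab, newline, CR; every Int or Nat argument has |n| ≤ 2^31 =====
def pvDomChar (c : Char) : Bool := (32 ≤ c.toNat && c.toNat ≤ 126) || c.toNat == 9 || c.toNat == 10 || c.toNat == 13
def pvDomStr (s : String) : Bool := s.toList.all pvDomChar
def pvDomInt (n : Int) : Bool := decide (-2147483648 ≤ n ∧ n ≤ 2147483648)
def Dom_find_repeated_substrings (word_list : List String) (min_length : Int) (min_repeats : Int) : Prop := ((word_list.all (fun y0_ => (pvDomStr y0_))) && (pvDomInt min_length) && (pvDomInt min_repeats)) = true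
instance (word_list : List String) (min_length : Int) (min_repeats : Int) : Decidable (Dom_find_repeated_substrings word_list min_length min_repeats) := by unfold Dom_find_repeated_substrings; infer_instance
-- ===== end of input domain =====

-- B replaces A's slice-per-(start,end) enumeration by extending each substring one
-- character at a time from its start position (objective: alternative — same counts, no slicing).

-- ===== PORT A =====
-- literal port of A; `length = len(word)` is inlined at its two use sites
def find_repeated_substrings (word_list : List String) (min_length : Int) (min_repeats : Int) : List (String × Int) :=
  let substring_counts : PySem.Dict String Int :=
    word_list.foldl (fun counts word =>
      (PySem.List.pyRange 0 (PySem.Str.len word)).foldl (fun counts start =>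
        (PySem.List.pyRange (start + min_length) (PySem.Str.len word + 1)).foldl (fun counts e =>
          counts.modify (PySem.Str.slice word (some start) (some e)) 0 (· + 1)) counts) counts)
      PySem.Dict.empty
  (substring_counts.items.foldl (fun d p => if min_repeats ≤ p.2 then d.insert p.1 p.2 else d) PySem.Dict.empty).items

-- ===== PORT B =====
-- port of Source B; the growing string `sub` is carried as its list of characters,
-- made a String (String.ofList) at the two dict accesses — exact on all inputs
def find_repeated_substrings_alt (word_list : List String) (min_length : Int) (min_repeats : Int) : List (String × Int) :=
  let counts : PySem.Dict String Int :=
    word_list.foldl (fun counts word =>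
      (PySem.List.pyRange 0 (PySem.Str.len word)).foldl (fun counts start =>
        ((PySem.Str.slice word (some start) none).toList.foldl
          (fun (st : PySem.Dict String Int × List Char) ch =>
            let sub := st.2 ++ [ch]
            ((if min_length ≤ (sub.length : Int) then
                st.1.insert (String.ofList sub) (st.1.getD (String.ofList sub) 0 + 1)
              else st.1), sub))
          (counts, ([] : List Char))).1) counts)
      PySem.Dict.empty
  (counts.items.foldl (fun d p => if min_repeats ≤ p.2 then d.insert p.1 p.2 else d) PySem.Dict.empty).items

-- ===== PRECONDITION & SPEC =====
-- Pre_ restricts to the natural domain min_length ≥ 1 (a positive minimum substring length):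
-- for min_length ≤ 0 A still returns, but its inner range feeds empty and negative
-- (wrap-around) slice bounds to word[start:end], so A additionally tallies the empty string
-- and re-tallies prefixes; B's character-extension enumeration produces no such slices.
def Pre_find_repeated_substrings (word_list : List String) (min_length : Int) (min_repeats : Int) : Prop :=
  1 ≤ min_length
instance (word_list : List String) (min_length : Int) (min_repeats : Int) : Decidable (Pre_find_repeated_substrings word_list min_length min_repeats) := by unfold Pre_find_repeated_substrings; infer_instance

def pvWitness_find_repeated_substrings : List String × Int × Int := (["aba", "ab"], 2, 2)

def Spec_find_repeated_substrings (word_list : List String) (min_length : Int) (min_repeats : Int) (out : List (String × Int)) : Prop := out = find_repeated_substrings_alt word_list min_length min_repeats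
instance (word_list : List String) (min_length : Int) (min_repeats : Int) (out : List (String × Int)) : Decidable (Spec_find_repeated_substrings word_list min_length min_repeats out) := by unfold Spec_find_repeated_substrings; infer_instance

-- ===== CLAIM (what is proved, stated in full; the proofs are below) =====
def Claim_equal_find_repeated_substrings : Prop := ∀ (word_list : List String) (min_length : Int) (min_repeats : Int), Dom_find_repeated_substrings word_list min_length min_repeats → Pre_find_repeated_substrings word_list min_length min_repeats → Spec_find_repeated_substrings word_list min_length min_repeats (find_repeated_substrings word_list min_length min_repeats)

-- ===== LEMMAS AND PROOFS =====

-- the substrings B counts from one start position (prefix read so far = `pre`), in order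
def pvSubsFrom (ml : Int) (pre : List Char) : List Char → List String
  | [] => []
  | c :: cs => (if ml ≤ (pre.length : Int) + 1 then [String.ofList (pre ++ [c])] else []) ++ pvSubsFrom ml (pre ++ [c]) cs

-- B's inner character fold is the insert-counting fold over pvSubsFrom
theorem pv_charfold (ml : Int) (cs : List Char) : ∀ (pre : List Char) (d : PySem.Dict String Int),
    (cs.foldl
      (fun (st : PySem.Dict String Int × List Char) ch =>
        let sub := st.2 ++ [ch]
        ((if ml ≤ (sub.length : Int) then
            st.1.insert (String.ofList sub) (st.1.getD (String.ofList sub) 0 + 1)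
          else st.1), sub))
      (d, pre)).1
    = (pvSubsFrom ml pre cs).foldl (fun d x => d.insert x (d.getD x 0 + 1)) d := by
  induction cs with
  | nil => intro pre d; simp [pvSubsFrom]
  | cons c cs ih =>
    intro pre d
    simp only [List.foldl_cons]
    rw [ih]
    simp only [pvSubsFrom, List.foldl_append]
    congr 1
    have hlen : (((pre ++ [c]).length : Nat) : Int) = (pre.length : Int) + 1 := by simp
    rw [hlen]
    by_cases h : ml ≤ (pre.length : Int) + 1
    · rw [if_pos h, if_pos h]; simp
    · rw [if_neg h, if_neg h]; simp

theorem pv_pyRange_add (a b c : Int) :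
    PySem.List.pyRange (a + c) (b + c) = (PySem.List.pyRange a b).map (· + c) := by
  simp only [PySem.List.pyRange_one, List.map_map]
  have h : b + c - (a + c) = b - a := by ring
  rw [h]
  apply List.map_congr_left
  intro k _
  simp [Function.comp]
  ring

-- closed form for pvSubsFrom: the prefixes of `pre ++ t` longer than pre that reach length ml
theorem pv_subsFrom_eq (ml : Int) (t : List Char) : ∀ (pre : List Char),
    pvSubsFrom ml pre t
    = (PySem.List.pyRange (max (ml - (pre.length : Int)) 1) ((t.length : Int) + 1)).map
        (fun j => String.ofList (pre ++ t.take j.toNat)) := by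
  induction t with
  | nil =>
    intro pre
    rw [pvSubsFrom, PySem.List.pyRange_one_eq_nil (by simp), List.map_nil]
  | cons c cs ih =>
    intro pre
    have hl : (((pre ++ [c]).length : Nat) : Int) = (pre.length : Int) + 1 := by simp
    have hcl : (((c :: cs).length : Nat) : Int) = (cs.length : Int) + 1 := by
      rw [List.length_cons]; push_cast; ring
    have hstep : ∀ j : Int, 1 ≤ j →
        String.ofList (pre ++ (c :: cs).take (j + 1).toNat) = String.ofList ((pre ++ [c]) ++ cs.take j.toNat) := by
      intro j hj
      have h1 : (j + 1).toNat = j.toNat + 1 := by omega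
      rw [h1, List.take_succ_cons]
      simp
    rw [pvSubsFrom, ih, hl, hcl]
    by_cases h : ml ≤ (pre.length : Int) + 1
    · have hmax : max (ml - (pre.length : Int)) 1 = 1 := by omega
      have hmax' : max (ml - ((pre.length : Int) + 1)) 1 = 1 := by omega
      rw [if_pos h, hmax', hmax]
      conv_rhs => rw [PySem.List.pyRange_one_cons (by omega), List.map_cons]
      have h2 : PySem.List.pyRange (1 + 1) ((cs.length : Int) + 1 + 1)
          = (PySem.List.pyRange 1 ((cs.length : Int) + 1)).map (· + 1) :=
        pv_pyRange_add 1 ((cs.length : Int) + 1) 1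
      rw [h2, List.map_map]
      simp only [List.singleton_append, List.cons.injEq]
      constructor
      · simp
      · symm
        apply List.map_congr_left
        intro j hj
        have hj1 : 1 ≤ j := (PySem.List.mem_pyRange_one.mp hj).1
        simpa using hstep j hj1
    · have hmax : max (ml - (pre.length : Int)) 1 = ml - pre.length := by omega
      have hmax' : max (ml - ((pre.length : Int) + 1)) 1 = ml - pre.length - 1 := by omega
      rw [if_neg h, hmax', hmax, List.nil_append]
      have h2 : PySem.List.pyRange (ml - (pre.length : Int) - 1 + 1) ((cs.length : Int) + 1 + 1)
          = (PySem.List.pyRange (ml - (pre.length : Int) - 1) ((cs.length : Int) + 1)).map (· + 1) :=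
        pv_pyRange_add _ _ 1
      have e1 : ml - (pre.length : Int) = ml - (pre.length : Int) - 1 + 1 := by ring
      conv_rhs => rw [e1, h2]
      rw [List.map_map]
      symm
      apply List.map_congr_left
      intro j hj
      have hj1 : 1 ≤ j := by
        have := (PySem.List.mem_pyRange_one.mp hj).1
        omega
      simpa using hstep j hj1

theorem pv_str_slice (w : String) (a? b? : Option Int) :
    PySem.Str.slice w a? b? = String.ofList (PySem.List.slice w.toList a? b?) := by
  rw [← PySem.Chars.slice_eq_listSlice, ← PySem.Str.toList_slice, String.ofList_toList]

-- per (word, start): A's slice list equals B's extension list (min_length ≥ 1)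
theorem pv_inner_eq (w : String) (ml : Int) (hml : 1 ≤ ml) (s : Int)
    (hs0 : 0 ≤ s) (hsn : s < (w.toList.length : Int)) :
    (PySem.List.pyRange (s + ml) ((w.toList.length : Int) + 1)).map
        (fun e => PySem.Str.slice w (some s) (some e))
    = pvSubsFrom ml [] ((PySem.Str.slice w (some s) none).toList) := by
  set t : List Char := w.toList.drop s.toNat with ht
  have htl : (PySem.Str.slice w (some s) none).toList = t := by
    rw [PySem.Str.toList_slice, PySem.Chars.slice_eq_listSlice, PySem.List.slice_from _ hs0]
  rw [htl, pv_subsFrom_eq]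
  have hmax : max (ml - (([] : List Char).length : Int)) 1 = ml := by simp; omega
  rw [hmax]
  have hlen : (t.length : Int) = (w.toList.length : Int) - s := by
    rw [ht]; rw [List.length_drop]; omega
  rw [hlen]
  have hr : PySem.List.pyRange (s + ml) ((w.toList.length : Int) + 1)
      = (PySem.List.pyRange ml ((w.toList.length : Int) - s + 1)).map (· + s) := by
    have e1 : s + ml = ml + s := by ring
    have e2 : (w.toList.length : Int) + 1 = ((w.toList.length : Int) - s + 1) + s := by ring
    rw [e1, e2, pv_pyRange_add]
  rw [hr, List.map_map]
  apply List.map_congr_left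
  intro j hj
  have hj1 : ml ≤ j := (PySem.List.mem_pyRange_one.mp hj).1
  simp only [Function.comp_apply, List.nil_append]
  rw [pv_str_slice]
  have hsl := PySem.List.slice_toNat w.toList (a := s) (b := j + s) (by omega) (by omega)
  rw [hsl]
  have : (j + s).toNat - s.toNat = j.toNat := by omega
  rw [this, ht]

-- the flat list of all substrings both programs count, in order
def pvAll (word_list : List String) (ml : Int) : List String :=
  word_list.flatMap (fun w =>
    (PySem.List.pyRange 0 (PySem.Str.len w)).flatMap (fun s =>
      pvSubsFrom ml [] ((PySem.Str.slice w (some s) none).toList)))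

-- both counting loops build Counter(pvAll word_list ml)
theorem pv_counts_eq (word_list : List String) (ml : Int) (hml : 1 ≤ ml) :
    word_list.foldl (fun counts word =>
      (PySem.List.pyRange 0 (PySem.Str.len word)).foldl (fun counts start =>
        (PySem.List.pyRange (start + ml) (PySem.Str.len word + 1)).foldl (fun counts e =>
          counts.modify (PySem.Str.slice word (some start) (some e)) 0 (· + 1)) counts) counts)
      PySem.Dict.empty
    = word_list.foldl (fun counts word =>
      (PySem.List.pyRange 0 (PySem.Str.len word)).foldl (fun counts start =>
        ((PySem.Str.slice word (some start) none).toList.foldl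
          (fun (st : PySem.Dict String Int × List Char) ch =>
            let sub := st.2 ++ [ch]
            ((if ml ≤ (sub.length : Int) then
                st.1.insert (String.ofList sub) (st.1.getD (String.ofList sub) 0 + 1)
              else st.1), sub))
          (counts, ([] : List Char))).1) counts)
      PySem.Dict.empty := by
  have hA : ∀ d : PySem.Dict String Int,
      word_list.foldl (fun counts word =>
        (PySem.List.pyRange 0 (PySem.Str.len word)).foldl (fun counts start =>
          (PySem.List.pyRange (start + ml) (PySem.Str.len word + 1)).foldl (fun counts e =>
            counts.modify (PySem.Str.slice word (some start) (some e)) 0 (· + 1)) counts) counts) d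
      = (pvAll word_list ml).foldl (fun d x => d.modify x 0 (· + 1)) d := by
    intro d
    rw [pvAll, List.foldl_flatMap]
    apply PySem.List.foldl_congr_mem
    intro acc w _
    rw [List.foldl_flatMap]
    apply PySem.List.foldl_congr_mem
    intro acc2 s hs
    have hs' := PySem.List.mem_pyRange_one.mp hs
    rw [← pv_inner_eq w ml hml s hs'.1 (by have := hs'.2; rwa [PySem.Str.len_eq] at this)]
    rw [List.foldl_map]
    rw [PySem.Str.len_eq]
  have hB : ∀ d : PySem.Dict String Int,
      word_list.foldl (fun counts word =>
        (PySem.List.pyRange 0 (PySem.Str.len word)).foldl (fun counts start =>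
          ((PySem.Str.slice word (some start) none).toList.foldl
            (fun (st : PySem.Dict String Int × List Char) ch =>
              let sub := st.2 ++ [ch]
              ((if ml ≤ (sub.length : Int) then
                  st.1.insert (String.ofList sub) (st.1.getD (String.ofList sub) 0 + 1)
                else st.1), sub))
            (counts, ([] : List Char))).1) counts) d
      = (pvAll word_list ml).foldl (fun d x => d.insert x (d.getD x 0 + 1)) d := by
    intro d
    rw [pvAll, List.foldl_flatMap]
    apply PySem.List.foldl_congr_mem
    intro acc w _
    rw [List.foldl_flatMap]
    apply PySem.List.foldl_congr_mem
    intro acc2 s _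
    rw [pv_charfold]
  rw [hA, hB, ← PySem.Dict.counter_eq_foldl, PySem.Dict.foldl_insert_getD_add_one_eq_counter]

-- ===== VERDICT (by name: the statement is the Claim_ definition above) =====
theorem find_repeated_substrings_spec : Claim_equal_find_repeated_substrings := by
  intro wl ml mr _ hpre
  unfold Spec_find_repeated_substrings
  unfold find_repeated_substrings find_repeated_substrings_alt
  rw [pv_counts_eq wl ml hpre]
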